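-- pv_equiv track=rewrite | github.com/DireMonarch/graph-canonical-relabel-prototyping | refiner.py | first_index_of_max_cell_size_of_partition
-- ===== SOURCE A (Python) =====
-- def first_index_of_max_cell_size_of_partition(partition):
--     '''
--     Finds the largest cell size in partition, and returns the index of the first
--     occurrence of a cell of that size
--     '''
--
--     max = 0
--     idx = 0
--     for i, cell in enumerate(partition):
--         if len(cell) > max:
--             max = len(cell)
--             idx = i
--     return idx
-- ===== SOURCE B (Python) =====
-- def first_index_of_max_cell_size_of_partition(partition):
--     # Divide and conquer: the best (size, index) of a run is the tie-preferring-left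
--     # combination of the bests of its two halves.
--     def best(cells, base):
--         # cells is nonempty; returns (size, absolute index) of the first largest cell
--         if len(cells) == 1:
--             return (len(cells[0]), base)
--         mid = len(cells) // 2
--         ls, li = best(cells[:mid], base)
--         rs, ri = best(cells[mid:], base + mid)
--         return (ls, li) if ls >= rs else (rs, ri)
--     if not partition:
--         return 0
--     return best(partition, 0)[1]
-- ===== Notes on version B (the rewrite author's own statement) =====
-- stated objective: alternative
-- what changed: Replaces A's single forward running-max/index accumulator loop by a divide-and-conquer: recursively compute the (size, index) of the first largest cell of each half and combine them preferring the left half on ties; an empty partition returns 0 as in A.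
import Mathlib
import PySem

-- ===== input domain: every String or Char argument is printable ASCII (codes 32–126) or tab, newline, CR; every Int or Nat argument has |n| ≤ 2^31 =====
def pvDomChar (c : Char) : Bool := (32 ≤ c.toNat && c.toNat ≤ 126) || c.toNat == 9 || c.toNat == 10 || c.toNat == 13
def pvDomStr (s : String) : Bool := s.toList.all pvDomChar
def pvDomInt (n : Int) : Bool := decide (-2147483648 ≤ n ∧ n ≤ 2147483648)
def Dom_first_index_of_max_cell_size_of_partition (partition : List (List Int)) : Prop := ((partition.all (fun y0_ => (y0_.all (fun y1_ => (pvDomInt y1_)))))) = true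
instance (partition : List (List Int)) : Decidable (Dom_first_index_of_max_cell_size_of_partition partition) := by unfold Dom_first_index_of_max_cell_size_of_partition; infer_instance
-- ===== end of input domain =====

-- B replaces A's single forward running-max loop by a divide-and-conquer over halves
-- (objective: alternative algorithm, same return value; not claimed faster).

-- ===== PORT A =====
-- A's for-loop over enumerate(partition) with running (max, idx) state, as structural recursion.
def fiAux (cells : List (List Int)) (i : Int) (m : Int) (idx : Int) : Int :=
  match cells with
  | [] => idx
  | c :: cs => if (c.length : Int) > m then fiAux cs (i + 1) (c.length : Int) i else fiAux cs (i + 1) m idx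

def first_index_of_max_cell_size_of_partition (partition : List (List Int)) : Int :=
  fiAux partition 0 0 0

-- ===== PORT B =====
-- Source B's helper best(cells, base): divide the run in halves at len//2, recurse, combine
-- preferring the left half on ties.  Python never calls it on []; the `length ≤ 1`
-- guard makes the Lean function total (on [] it returns (0, base), unreachable from _alt).
def bestDC (cells : List (List Int)) (base : Int) : Int × Int :=
  if cells.length ≤ 1 then
    (((cells.headD []).length : Int), base)
  else
    let mid := cells.length / 2
    let l := bestDC (cells.take mid) base
    let r := bestDC (cells.drop mid) (base + (mid : Int))
    if l.1 ≥ r.1 then l else r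
termination_by cells.length
decreasing_by
  · simp only [List.length_take]; omega
  · simp only [List.length_drop]; omega

def first_index_of_max_cell_size_of_partition_alt (partition : List (List Int)) : Int :=
  if partition = [] then 0 else (bestDC partition 0).2

-- ===== PRECONDITION & SPEC =====
def Spec_first_index_of_max_cell_size_of_partition (partition : List (List Int)) (out : Int) : Prop := out = first_index_of_max_cell_size_of_partition_alt partition
instance (partition : List (List Int)) (out : Int) : Decidable (Spec_first_index_of_max_cell_size_of_partition partition out) := by unfold Spec_first_index_of_max_cell_size_of_partition; infer_instance

-- ===== CLAIM (what is proved, stated in full; the proofs are below) =====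
def Claim_equal_first_index_of_max_cell_size_of_partition : Prop := ∀ (partition : List (List Int)), Dom_first_index_of_max_cell_size_of_partition partition → Spec_first_index_of_max_cell_size_of_partition partition (first_index_of_max_cell_size_of_partition partition)

-- ===== LEMMAS AND PROOFS =====

-- Reference semantics: (max cell length (0 on []), first index attaining it), computed
-- back-to-front; both ports are proved equal to it.
def fiRec (cells : List (List Int)) : Int × Int :=
  match cells with
  | [] => (0, 0)
  | c :: cs =>
    let p := fiRec cs
    if (c.length : Int) ≥ p.1 then ((c.length : Int), 0) else (p.1, p.2 + 1)

theorem fiRec_cons (c : List Int) (cs : List (List Int)) :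
    fiRec (c :: cs) =
      if (c.length : Int) ≥ (fiRec cs).1 then ((c.length : Int), 0)
      else ((fiRec cs).1, (fiRec cs).2 + 1) := rfl

theorem fiRec_fst_nonneg (cells : List (List Int)) : 0 ≤ (fiRec cells).1 := by
  induction cells with
  | nil => simp [fiRec]
  | cons c cs ih =>
    rw [fiRec_cons]
    split
    · simp
    · simp; omega

theorem fiRec_snd_of_fst_nonpos (cells : List (List Int)) (h : (fiRec cells).1 ≤ 0) :
    (fiRec cells).2 = 0 := by
  cases cells with
  | nil => rfl
  | cons c cs =>
    rw [fiRec_cons] at h ⊢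
    by_cases hc : (c.length : Int) ≥ (fiRec cs).1
    · rw [if_pos hc]
    · rw [if_neg hc] at h
      have := fiRec_fst_nonneg cs
      dsimp only at h
      omega

theorem fiRec_append (xs ys : List (List Int)) :
    fiRec (xs ++ ys) =
      if (fiRec xs).1 ≥ (fiRec ys).1 then fiRec xs
      else ((fiRec ys).1, (xs.length : Int) + (fiRec ys).2) := by
  induction xs with
  | nil =>
    simp only [List.nil_append, fiRec, List.length_nil]
    by_cases h : (0 : Int) ≥ (fiRec ys).1
    · rw [if_pos h]
      have h2 := fiRec_snd_of_fst_nonpos ys h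
      have h1 := fiRec_fst_nonneg ys
      ext
      · dsimp only; omega
      · dsimp only; omega
    · rw [if_neg h]; simp
  | cons c xs ih =>
    rw [List.cons_append, fiRec_cons, ih, fiRec_cons, List.length_cons]
    have hx := fiRec_fst_nonneg xs
    have hy := fiRec_fst_nonneg ys
    by_cases h1 : (fiRec xs).1 ≥ (fiRec ys).1
    · rw [if_pos h1]
      by_cases h2 : (c.length : Int) ≥ (fiRec xs).1
      · rw [if_pos h2, if_pos (show ((c.length : Int), (0 : Int)).1 ≥ (fiRec ys).1 by dsimp only; omega)]
      · rw [if_neg h2, if_pos (show ((fiRec xs).1, (fiRec xs).2 + 1).1 ≥ (fiRec ys).1 from h1)]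
    · rw [if_neg h1]
      by_cases h2 : (c.length : Int) ≥ (fiRec ys).1
      · rw [if_pos (show (c.length : Int) ≥ ((fiRec ys).1, (xs.length : Int) + (fiRec ys).2).1 from h2)]
        by_cases h3 : (c.length : Int) ≥ (fiRec xs).1
        · rw [if_pos h3, if_pos (show ((c.length : Int), (0 : Int)).1 ≥ (fiRec ys).1 from h2)]
        · exact absurd (by omega) h3
      · rw [if_neg (show ¬ (c.length : Int) ≥ ((fiRec ys).1, (xs.length : Int) + (fiRec ys).2).1 from h2)]
        by_cases h3 : (c.length : Int) ≥ (fiRec xs).1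
        · rw [if_pos h3, if_neg (show ¬ ((c.length : Int), (0 : Int)).1 ≥ (fiRec ys).1 from h2)]
          dsimp only
          simp only [Prod.mk.injEq]
          refine ⟨by trivial, by push_cast; ring⟩
        · rw [if_neg h3, if_neg (show ¬ ((fiRec xs).1, (fiRec xs).2 + 1).1 ≥ (fiRec ys).1 by dsimp only; omega)]
          dsimp only
          simp only [Prod.mk.injEq]
          refine ⟨by trivial, by push_cast; ring⟩

-- A's loop against the reference semantics
theorem fiAux_eq (cells : List (List Int)) : ∀ (i m idx : Int), 0 ≤ m →
    fiAux cells i m idx = if (fiRec cells).1 > m then i + (fiRec cells).2 else idx := by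
  induction cells with
  | nil => intro i m idx hm; simp only [fiAux, fiRec]; rw [if_neg (by omega)]
  | cons c cs ih =>
    intro i m idx hm
    rw [show fiAux (c :: cs) i m idx
        = if (c.length : Int) > m then fiAux cs (i + 1) (c.length : Int) i
          else fiAux cs (i + 1) m idx from rfl,
       fiRec_cons]
    have hcs := fiRec_fst_nonneg cs
    have hc0 : (0 : Int) ≤ (c.length : Int) := Int.natCast_nonneg _
    by_cases h2 : (c.length : Int) ≥ (fiRec cs).1
    · rw [if_pos h2]
      dsimp only
      by_cases hgt : (c.length : Int) > m
      · rw [if_pos hgt, if_pos hgt, ih _ _ _ hc0, if_neg (by omega)]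
        omega
      · rw [if_neg hgt, if_neg (by omega), ih _ _ _ hm, if_neg (by omega)]
    · rw [if_neg h2]
      dsimp only
      by_cases hgt : (c.length : Int) > m
      · rw [if_pos hgt, ih _ _ _ hc0, if_pos (by omega), if_pos (by omega)]
        ring
      · rw [if_neg hgt, ih _ _ _ hm]
        by_cases h3 : (fiRec cs).1 > m
        · rw [if_pos h3, if_pos h3]; ring
        · rw [if_neg h3, if_neg h3]

-- B's divide and conquer against the reference semantics
theorem bestDC_eq (n : Nat) : ∀ (cells : List (List Int)), cells.length ≤ n → cells ≠ [] →
    ∀ (base : Int), bestDC cells base = ((fiRec cells).1, base + (fiRec cells).2) := by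
  induction n with
  | zero => intro cells hn hne; cases cells <;> simp_all
  | succ n ih =>
    intro cells hn hne base
    rw [bestDC]
    by_cases h1 : cells.length ≤ 1
    · rw [if_pos h1]
      obtain ⟨c, cs, rfl⟩ := List.exists_cons_of_ne_nil hne
      have : cs = [] := by cases cs <;> simp_all
      subst this
      have hr : fiRec [c] = ((c.length : Int), 0) := by
        rw [fiRec_cons]
        simp [fiRec]
      rw [hr]
      simp
    · rw [if_neg h1]
      dsimp only
      have h2 : 2 ≤ cells.length := by omega
      have hmid1 : 1 ≤ cells.length / 2 := by omega
      have hmid2 : cells.length / 2 < cells.length := by omega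
      have htl : (cells.take (cells.length / 2)).length = cells.length / 2 := by
        simp; omega
      have hdl : (cells.drop (cells.length / 2)).length = cells.length - cells.length / 2 := by
        simp
      have htne : cells.take (cells.length / 2) ≠ [] := by
        intro h; rw [h] at htl; simp at htl; omega
      have hdne : cells.drop (cells.length / 2) ≠ [] := by
        intro h; rw [h] at hdl; simp at hdl; omega
      rw [ih _ (by omega) htne, ih _ (by omega) hdne]
      have happ := fiRec_append (cells.take (cells.length / 2)) (cells.drop (cells.length / 2))
      rw [List.take_append_drop] at happ
      rw [htl] at happ
      set a := fiRec (cells.take (cells.length / 2)) with ha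
      set b := fiRec (cells.drop (cells.length / 2)) with hb
      by_cases hc : a.1 ≥ b.1
      · rw [if_pos hc] at happ
        rw [if_pos (show (a.1, base + a.2).1 ≥ (b.1, base + (↑(cells.length / 2) : Int) + b.2).1 from hc), happ]
      · rw [if_neg hc] at happ
        rw [if_neg (show ¬ (a.1, base + a.2).1 ≥ (b.1, base + (↑(cells.length / 2) : Int) + b.2).1 from hc), happ]
        dsimp only
        refine Prod.ext rfl ?_
        dsimp only
        push_cast
        ring

-- ===== VERDICT (by name: the statement is the Claim_ definition above) =====
theorem first_index_of_max_cell_size_of_partition_spec : Claim_equal_first_index_of_max_cell_size_of_partition := by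
  intro partition _
  unfold Spec_first_index_of_max_cell_size_of_partition
  unfold first_index_of_max_cell_size_of_partition first_index_of_max_cell_size_of_partition_alt
  by_cases hne : partition = []
  · subst hne; rfl
  · rw [if_neg hne, bestDC_eq partition.length partition le_rfl hne 0]
    rw [fiAux_eq partition 0 0 0 le_rfl]
    have h0 := fiRec_fst_nonneg partition
    dsimp only
    by_cases h : (fiRec partition).1 > 0
    · rw [if_pos h]
    · rw [if_neg h]
      rw [fiRec_snd_of_fst_nonpos partition (by omega)]
      omega
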